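-- pv_equiv track=rewrite | github.com/singhsatnam/puzzel | puzzel/min_max_2d.py | pathMaxScore
-- ===== SOURCE A (Python) =====
-- def pathMaxScore(m):
--     startVal = m[0][0]
--     startCoor = (0, 0)
--     stack = [(startVal, startCoor, [])]  # [] bcuz problem says path should exlude start and end
--     dirs = [(1, 0), (0, 1)]  # only right and down are allowed
--     maxScore = 0
--     while stack:
--         node, coor, path = stack.pop()
--         x, y = coor
--
--         # check if leaf node (aka the mth, nth cell) is reached
--         if x == len(m) - 1 and y == len(m[0]) - 1:
--             maxScore = max(maxScore, min(path[:-1]))  # path[:-1] bcuz problem says exclude end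
--             # count += 1
--
--         for dir in dirs:
--             newX, newY = x + dir[0], y + dir[1]
--             # within bounds:
--             if newX >= 0 and newX <= len(m) - 1 and newY >= 0 and newY <= len(m[0]) - 1:
--                 stack.append((m[newX][newY], (newX, newY), path + [m[newX][newY]]))
--
--     return maxScore
-- ===== SOURCE B (Python) =====
-- def pathMaxScore(m):
--     # Bottom-up DP (O(R*C)): best[j] = best over monotone paths from (i, j) to the
--     # bottom-right corner of the minimum interior cell value (INF = empty interior).
--     # Matches A's floor of 0 (A initialises maxScore = 0).
--     R, C = len(m), len(m[0])
--     INF = 1 << 40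
--     nxt = []
--     for i in range(R - 1, -1, -1):
--         cur = []
--         for j in range(C - 1, -1, -1):
--             cands = []
--             if i + 1 < R:
--                 cands.append(INF if (i + 1 == R - 1 and j == C - 1) else min(m[i + 1][j], nxt[j]))
--             if j + 1 < C:
--                 cands.append(INF if (i == R - 1 and j + 1 == C - 1) else min(m[i][j + 1], cur[0]))
--             cur = [max(cands) if cands else 0] + cur
--         nxt = cur
--     return max(0, nxt[0])
-- ===== Notes on version B (the rewrite author's own statement) =====
-- stated objective: faster
-- what changed: A enumerates every monotone path with an explicit DFS stack (exponential); B computes the same max-over-paths of min-of-interior with a bottom-up O(R*C) dynamic program over rows, using a large sentinel for an empty interior and keeping A's floor of 0.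
import Mathlib
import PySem

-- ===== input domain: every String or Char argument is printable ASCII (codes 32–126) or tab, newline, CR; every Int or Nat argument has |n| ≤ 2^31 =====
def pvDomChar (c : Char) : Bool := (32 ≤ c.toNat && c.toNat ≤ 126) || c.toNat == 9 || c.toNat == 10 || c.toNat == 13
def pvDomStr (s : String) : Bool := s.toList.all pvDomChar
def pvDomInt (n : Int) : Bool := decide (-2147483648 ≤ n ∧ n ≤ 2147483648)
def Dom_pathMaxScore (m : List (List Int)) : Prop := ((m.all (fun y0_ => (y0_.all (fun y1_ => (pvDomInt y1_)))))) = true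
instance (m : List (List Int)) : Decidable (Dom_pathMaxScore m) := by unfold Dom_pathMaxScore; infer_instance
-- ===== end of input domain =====

-- B replaces A's exponential DFS path enumeration by a bottom-up O(R*C) dynamic program
-- (same return value; a timing run measured B faster).

-- m[i][j] (both indexings are guarded by in-bounds checks in both Pythons; default never reached inside Pre_)
def cell (m : List (List Int)) (i j : Int) : Int :=
  (PySem.List.pyGet? ((PySem.List.pyGet? m i).getD []) j).getD 0

-- ===== PORT A =====
-- A's while-stack DFS; Lean list head = Python stack top (append+pop at the right end).
-- 'fuel' only makes the recursion structural: 3^(rows+cols) bounds the number of pops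
-- (each pop strictly decreases the stack measure proved in the lemmas below), so the
-- fuel is never exhausted on pathMaxScore's call.
def loopA (m : List (List Int)) (fuel : Nat) (stack : List (Int × (Int × Int) × List Int))
    (maxScore : Int) : Int :=
  match fuel, stack with
  | 0, _ => maxScore
  | _ + 1, [] => maxScore
  | n + 1, (_, (x, y), path) :: rest =>
    let R : Int := (m.length : Int)
    let C : Int := ((m.headD []).length : Int)
    -- maxScore = max(maxScore, min(path[:-1]))  (min of an empty list raises in Python: outside Pre_)
    let maxScore' : Int :=
      if x = R - 1 ∧ y = C - 1 then
        max maxScore ((PySem.List.min? (PySem.List.slice path none (some (-1))) id).getD 0)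
      else maxScore
    -- dir (1,0) pushed first, dir (0,1) second (so it ends on top)
    let s1 := if 0 ≤ x + 1 ∧ x + 1 ≤ R - 1 ∧ 0 ≤ y ∧ y ≤ C - 1 then
        (cell m (x + 1) y, (x + 1, y), path ++ [cell m (x + 1) y]) :: rest else rest
    let s2 := if 0 ≤ x ∧ x ≤ R - 1 ∧ 0 ≤ y + 1 ∧ y + 1 ≤ C - 1 then
        (cell m x (y + 1), (x, y + 1), path ++ [cell m x (y + 1)]) :: s1 else s1
    loopA m n s2 maxScore'

def pathMaxScore (m : List (List Int)) : Int :=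
  let startVal := cell m 0 0
  loopA m (3 ^ (m.length + (m.headD []).length)) [(startVal, (0, 0), ([] : List Int))] 0

-- ===== PORT B =====
def pvINF : Int := 1099511627776  -- 1 << 40

-- the inner 'for j in range(C-1,-1,-1)' loop of B, building cur by prepending; k = cells built so far
def rowGo (m : List (List Int)) (R C : Int) (nxt : List Int) (i : Int) : Nat → List Int
  | 0 => []
  | k + 1 =>
    let cur := rowGo m R C nxt i k
    let j : Int := C - (k + 1)
    let down : Option Int :=
      if i + 1 < R then
        some (if i + 1 = R - 1 ∧ j = C - 1 then pvINF
              else min (cell m (i + 1) j) ((PySem.List.pyGet? nxt j).getD 0))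
      else none
    let right : Option Int :=
      if j + 1 < C then
        some (if i = R - 1 ∧ j + 1 = C - 1 then pvINF
              else min (cell m i (j + 1)) ((PySem.List.pyGet? cur 0).getD 0))
      else none
    let best : Int :=
      match down, right with
      | none, none => 0
      | some d, none => d
      | none, some r => r
      | some d, some r => max d r
    best :: cur

def pathMaxScore_alt (m : List (List Int)) : Int :=
  let R : Int := (m.length : Int)
  let C : Int := ((m.headD []).length : Int)
  let nxt := (PySem.List.pyRange (R - 1) (-1) (-1)).foldl
    (fun nxt i => rowGo m R C nxt i C.toNat) ([] : List Int)
  max 0 ((PySem.List.pyGet? nxt 0).getD 0)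

-- ===== PRECONDITION & SPEC =====
-- Pre_ is exactly where the Python A returns: it raises IndexError on an empty grid, an empty
-- first row or a later row shorter than the first (cells up to column len(m[0])-1 are read in
-- every row), and ValueError (min of empty) when rows+cols < 4 (no interior cell on any path).
def Pre_pathMaxScore (m : List (List Int)) : Prop :=
  m ≠ [] ∧ m.headD [] ≠ [] ∧ (∀ r ∈ m, (m.headD []).length ≤ r.length) ∧
    4 ≤ m.length + (m.headD []).length
instance (m : List (List Int)) : Decidable (Pre_pathMaxScore m) := by
  unfold Pre_pathMaxScore; infer_instance

def pvWitness_pathMaxScore : List (List Int) := [[1, 2], [3, 4]]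

def Spec_pathMaxScore (m : List (List Int)) (out : Int) : Prop := out = pathMaxScore_alt m
instance (m : List (List Int)) (out : Int) : Decidable (Spec_pathMaxScore m out) := by
  unfold Spec_pathMaxScore; infer_instance

-- ===== CLAIM (what is proved, stated in full; the proofs are below) =====
def Claim_equal_pathMaxScore : Prop :=
  ∀ (m : List (List Int)), Dom_pathMaxScore m → Pre_pathMaxScore m →
    Spec_pathMaxScore m (pathMaxScore m)

-- ===== LEMMAS AND PROOFS =====

-- stack measure: each pop strictly decreases it, so it bounds the number of pops
def pvW (m : List (List Int)) (x y : Int) : Nat :=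
  3 ^ ((((m.length : Int) - 1 - x) + (((m.headD []).length : Int) - 1 - y)).toNat)

def pvM (m : List (List Int)) (st : List (Int × (Int × Int) × List Int)) : Nat :=
  (st.map (fun e => pvW m e.2.1.1 e.2.1.2)).sum

lemma pvM_cons (m : List (List Int)) (e : Int × (Int × Int) × List Int)
    (rest : List (Int × (Int × Int) × List Int)) :
    pvM m (e :: rest) = pvW m e.2.1.1 e.2.1.2 + pvM m rest := rfl

lemma pvW_pos (m : List (List Int)) (x y : Int) : 0 < pvW m x y :=
  pow_pos (by norm_num : (0:ℕ) < 3) _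

lemma pv_pow3_succ_lt (k : Nat) (h : 1 ≤ k) : 3 ^ (k - 1) + 3 ^ (k - 1) < 3 ^ k := by
  have h3 : 3 ^ k = 3 ^ (k - 1) * 3 := by
    rw [← pow_succ]
    congr 1
    omega
  have hp : 0 < 3 ^ (k - 1) := pow_pos (by norm_num : (0:ℕ) < 3) (k - 1)
  omega

lemma pv_dec_down (m : List (List Int)) (x y : Int)
    (h1 : 0 ≤ x + 1 ∧ x + 1 ≤ (m.length : Int) - 1 ∧ 0 ≤ y ∧
      y ≤ ((m.headD []).length : Int) - 1) :
    pvW m (x + 1) y < pvW m x y := by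
  unfold pvW
  set k := (((m.length : Int) - 1 - x) + (((m.headD []).length : Int) - 1 - y)).toNat with hk
  set b := (((m.length : Int) - 1 - (x + 1)) + (((m.headD []).length : Int) - 1 - y)).toNat with hb
  have e2 : b = k - 1 := by omega
  have e3 : 1 ≤ k := by omega
  rw [e2]
  have := pv_pow3_succ_lt k e3
  have hp2 : 0 < 3 ^ (k - 1) := pow_pos (by norm_num : (0:ℕ) < 3) _
  omega

lemma pv_dec_right (m : List (List Int)) (x y : Int)
    (h2 : 0 ≤ x ∧ x ≤ (m.length : Int) - 1 ∧ 0 ≤ y + 1 ∧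
      y + 1 ≤ ((m.headD []).length : Int) - 1) :
    pvW m x (y + 1) < pvW m x y := by
  unfold pvW
  set k := (((m.length : Int) - 1 - x) + (((m.headD []).length : Int) - 1 - y)).toNat with hk
  set a := (((m.length : Int) - 1 - x) + (((m.headD []).length : Int) - 1 - (y + 1))).toNat with ha
  have e1 : a = k - 1 := by omega
  have e3 : 1 ≤ k := by omega
  rw [e1]
  have := pv_pow3_succ_lt k e3
  have hp2 : 0 < 3 ^ (k - 1) := pow_pos (by norm_num : (0:ℕ) < 3) _
  omega

lemma pv_dec_both (m : List (List Int)) (x y : Int)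
    (h1 : 0 ≤ x + 1 ∧ x + 1 ≤ (m.length : Int) - 1 ∧ 0 ≤ y ∧
      y ≤ ((m.headD []).length : Int) - 1)
    (h2 : 0 ≤ x ∧ x ≤ (m.length : Int) - 1 ∧ 0 ≤ y + 1 ∧
      y + 1 ≤ ((m.headD []).length : Int) - 1) :
    pvW m x (y + 1) + pvW m (x + 1) y < pvW m x y := by
  unfold pvW
  set k := (((m.length : Int) - 1 - x) + (((m.headD []).length : Int) - 1 - y)).toNat with hk
  set a := (((m.length : Int) - 1 - x) + (((m.headD []).length : Int) - 1 - (y + 1))).toNat with ha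
  set b := (((m.length : Int) - 1 - (x + 1)) + (((m.headD []).length : Int) - 1 - y)).toNat with hb
  have e1 : a = k - 1 := by omega
  have e2 : b = k - 1 := by omega
  have e3 : 1 ≤ k := by omega
  rw [e1, e2]
  exact pv_pow3_succ_lt k e3

-- min with +infinity on the left (none = +∞)
def mo : Option Int → Int → Int
  | none, v => v
  | some u, v => min u v

-- best over monotone paths from (x,y) to the bottom-right of the min interior value; pvINF = empty interior
def F (m : List (List Int)) (x y : Int) : Int :=
  let R : Int := (m.length : Int)
  let C : Int := ((m.headD []).length : Int)
  let down : Option Int :=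
    if 0 ≤ x + 1 ∧ x + 1 ≤ R - 1 ∧ 0 ≤ y ∧ y ≤ C - 1 then
      some (if x + 1 = R - 1 ∧ y = C - 1 then pvINF
            else min (cell m (x + 1) y) (F m (x + 1) y))
    else none
  let right : Option Int :=
    if 0 ≤ x ∧ x ≤ R - 1 ∧ 0 ≤ y + 1 ∧ y + 1 ≤ C - 1 then
      some (if x = R - 1 ∧ y + 1 = C - 1 then pvINF
            else min (cell m x (y + 1)) (F m x (y + 1)))
    else none
  match down, right with
  | none, none => 0
  | some d, none => d
  | none, some r => r
  | some d, some r => max d r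
termination_by (((m.length : Int) - 1 - x) + (((m.headD []).length : Int) - 1 - y)).toNat
decreasing_by all_goals omega

-- the value a stack element will eventually contribute
def W (m : List (List Int)) (e : Int × (Int × Int) × List Int) : Int :=
  if e.2.1.1 = (m.length : Int) - 1 ∧ e.2.1.2 = ((m.headD []).length : Int) - 1 then
    (PySem.List.min? (PySem.List.slice e.2.2 none (some (-1))) id).getD 0
  else mo (PySem.List.min? e.2.2 id) (F m e.2.1.1 e.2.1.2)

def wfE (m : List (List Int)) (e : Int × (Int × Int) × List Int) : Prop :=
  0 ≤ e.2.1.1 ∧ e.2.1.1 ≤ (m.length : Int) - 1 ∧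
  0 ≤ e.2.1.2 ∧ e.2.1.2 ≤ ((m.headD []).length : Int) - 1 ∧
  (∀ v ∈ e.2.2, v ≤ 2147483648) ∧
  (e.2.2 = [] →
    ¬((e.2.1.1 + 1 = (m.length : Int) - 1 ∧ e.2.1.2 = ((m.headD []).length : Int) - 1) ∨
      (e.2.1.1 = (m.length : Int) - 1 ∧ e.2.1.2 + 1 = ((m.headD []).length : Int) - 1)))

lemma min?_append_singleton (p : List Int) (c : Int) :
    PySem.List.min? (p ++ [c]) id = some (mo (PySem.List.min? p id) c) := by
  simp only [PySem.List.min?, List.foldl_append, List.foldl_cons, List.foldl_nil, id]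
  split
  · rename_i heq
    rw [heq]
    rfl
  · rename_i v heq
    rw [heq]
    simp only [mo]
    split_ifs with h
    · exact congrArg some (by omega)
    · exact congrArg some (by omega)

lemma min?_isSome_of_ne_nil (p : List Int) (h : p ≠ []) :
    ∃ v, PySem.List.min? p id = some v := by
  rcases List.eq_nil_or_concat p with h0 | ⟨q, c, hqc⟩
  · exact absurd h0 h
  · subst hqc
    rw [List.concat_eq_append, min?_append_singleton]
    exact ⟨_, rfl⟩

lemma cell_le (m : List (List Int)) (hD : Dom_pathMaxScore m) (i j : Int) :
    cell m i j ≤ 2147483648 := by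
  unfold cell
  rcases h1 : PySem.List.pyGet? m i with _ | row
  · simp [PySem.List.pyGet?_eq_none_iff] at h1 ⊢
    simp [PySem.List.pyGet?, PySem.List.pyIdx?]
  · have hrow : row ∈ m := PySem.List.mem_of_pyGet?_eq_some _ h1
    simp only [Option.getD_some]
    rcases h2 : PySem.List.pyGet? row j with _ | v
    · norm_num
    · have hv : v ∈ row := PySem.List.mem_of_pyGet?_eq_some _ h2
      unfold Dom_pathMaxScore at hD
      simp only [List.all_eq_true] at hD
      have := hD row hrow v hv
      simp [pvDomInt] at this
      simpa using this.2

lemma mo_max (a : Option Int) (u v : Int) : mo a (max u v) = max (mo a u) (mo a v) := by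
  cases a with
  | none => rfl
  | some w => simp [mo, min_max_distrib_left]

lemma W_push (m : List (List Int)) (path : List Int) (x' y' : Int)
    (hp : ∀ v ∈ path, v ≤ 2147483648)
    (hpne : (x' = (m.length : Int) - 1 ∧ y' = ((m.headD []).length : Int) - 1) → path ≠ []) :
    W m (cell m x' y', (x', y'), path ++ [cell m x' y'])
      = mo (PySem.List.min? path id)
          (if x' = (m.length : Int) - 1 ∧ y' = ((m.headD []).length : Int) - 1 then pvINF
           else min (cell m x' y') (F m x' y')) := by
  by_cases hend : x' = (m.length : Int) - 1 ∧ y' = ((m.headD []).length : Int) - 1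
  · rw [if_pos hend]
    unfold W
    simp only []
    rw [if_pos hend, PySem.List.slice_to_neg_one, List.dropLast_concat]
    obtain ⟨v, hv⟩ := min?_isSome_of_ne_nil path (hpne hend)
    rw [hv]
    have hvle : v ≤ 2147483648 := hp v (PySem.List.min?_mem hv)
    simp only [mo, Option.getD_some]
    rw [min_eq_left (by unfold pvINF; omega)]
  · rw [if_neg hend]
    unfold W
    simp only []
    rw [if_neg hend, min?_append_singleton]
    rcases hm : PySem.List.min? path id with _ | v
    · simp [mo]
    · simp [mo, min_assoc]

lemma wfE_push (m : List (List Int)) (hD : Dom_pathMaxScore m) (path : List Int) (x' y' : Int)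
    (hb0 : 0 ≤ x') (hb1 : x' ≤ (m.length : Int) - 1)
    (hb2 : 0 ≤ y') (hb3 : y' ≤ ((m.headD []).length : Int) - 1)
    (hp : ∀ v ∈ path, v ≤ 2147483648) :
    wfE m (cell m x' y', (x', y'), path ++ [cell m x' y']) := by
  refine ⟨hb0, hb1, hb2, hb3, ?_, ?_⟩
  · intro v hv
    rcases List.mem_append.mp hv with h | h
    · exact hp v h
    · simp only [List.mem_singleton] at h
      subst h
      exact cell_le m hD x' y'
  · intro hcon
    simp at hcon

lemma loopA_inv (m : List (List Int)) (hD : Dom_pathMaxScore m) :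
    ∀ (n : Nat) (st : List (Int × (Int × Int) × List Int)) (acc : Int),
      pvM m st ≤ n → (∀ e ∈ st, wfE m e) →
      loopA m n st acc = (st.map (W m)).foldl max acc := by
  intro n
  induction n with
  | zero =>
    intro st acc hn hwf
    rcases st with _ | ⟨⟨c, ⟨x, y⟩, path⟩, rest⟩
    · rfl
    · exfalso
      rw [pvM_cons] at hn
      have hp := pvW_pos m x y
      dsimp only at hn
      omega
  | succ n ih =>
    intro st acc hn hwf
    rcases st with _ | ⟨⟨c, ⟨x, y⟩, path⟩, rest⟩
    · rfl
    · have hwf0 := hwf _ (List.mem_cons_self ..)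
      unfold wfE at hwf0
      simp only at hwf0
      obtain ⟨hx0, hx1, hy0, hy1, hple, hpnil⟩ := hwf0
      have hwfrest : ∀ e ∈ rest, wfE m e := fun e he => hwf e (List.mem_cons_of_mem _ he)
      rw [pvM_cons] at hn
      dsimp only at hn
      rw [loopA]
      simp only [List.map_cons, List.foldl_cons]
      by_cases hleaf : x = (m.length : Int) - 1 ∧ y = ((m.headD []).length : Int) - 1
      · -- leaf: no pushes, record the score
        have hgd : ¬(0 ≤ x + 1 ∧ x + 1 ≤ (m.length : Int) - 1 ∧ 0 ≤ y ∧
            y ≤ ((m.headD []).length : Int) - 1) := fun h => by have := h.2.1; omega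
        have hgr : ¬(0 ≤ x ∧ x ≤ (m.length : Int) - 1 ∧ 0 ≤ y + 1 ∧
            y + 1 ≤ ((m.headD []).length : Int) - 1) := fun h => by have := h.2.2.2; omega
        rw [if_pos hleaf, if_neg hgd, if_neg hgr,
          ih rest _ (by have := pvW_pos m x y; omega) hwfrest]
        unfold W
        simp only []
        rw [if_pos hleaf]
      · -- interior: the popped element is replaced by its pushed children
        rw [if_neg hleaf]
        have hWe : W m (c, (x, y), path) = mo (PySem.List.min? path id) (F m x y) := by
          unfold W
          simp only []
          rw [if_neg hleaf]
        by_cases hgd : 0 ≤ x + 1 ∧ x + 1 ≤ (m.length : Int) - 1 ∧ 0 ≤ y ∧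
            y ≤ ((m.headD []).length : Int) - 1
        · by_cases hgr : 0 ≤ x ∧ x ≤ (m.length : Int) - 1 ∧ 0 ≤ y + 1 ∧
              y + 1 ≤ ((m.headD []).length : Int) - 1
          · -- both children pushed
            rw [if_pos hgd, if_pos hgr]
            rw [ih _ _ (by
                rw [pvM_cons, pvM_cons]
                dsimp only
                have hlt := pv_dec_both m x y hgd hgr
                omega)
              (by
                intro e he
                rcases he with _ | ⟨_, he⟩
                · exact wfE_push m hD path x (y + 1) hgr.1 hgr.2.1 hgr.2.2.1 hgr.2.2.2 hple
                · rcases he with _ | ⟨_, he⟩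
                  · exact wfE_push m hD path (x + 1) y hgd.1 hgd.2.1 hgd.2.2.1 hgd.2.2.2 hple
                  · exact hwfrest _ he)]
            simp only [List.map_cons, List.foldl_cons]
            congr 1
            have hF : F m x y = max
                (if x + 1 = (m.length : Int) - 1 ∧ y = ((m.headD []).length : Int) - 1 then pvINF
                 else min (cell m (x + 1) y) (F m (x + 1) y))
                (if x = (m.length : Int) - 1 ∧ y + 1 = ((m.headD []).length : Int) - 1 then pvINF
                 else min (cell m x (y + 1)) (F m x (y + 1))) := by
              conv_lhs => rw [F]
              rw [if_pos hgd, if_pos hgr]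
            rw [W_push m path x (y + 1) hple
                (fun hc hnil => hpnil hnil (Or.inr hc)),
              W_push m path (x + 1) y hple
                (fun hc hnil => hpnil hnil (Or.inl hc)),
              hWe, hF, mo_max]
            rw [max_assoc, max_comm (mo _ _) (mo _ _), ← max_assoc]
          · -- only the down child is pushed
            rw [if_pos hgd, if_neg hgr]
            rw [ih _ _ (by
                rw [pvM_cons]
                dsimp only
                have hlt := pv_dec_down m x y hgd
                omega)
              (by
                intro e he
                rcases he with _ | ⟨_, he⟩
                · exact wfE_push m hD path (x + 1) y hgd.1 hgd.2.1 hgd.2.2.1 hgd.2.2.2 hple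
                · exact hwfrest _ he)]
            simp only [List.map_cons, List.foldl_cons]
            congr 1
            have hF : F m x y =
                (if x + 1 = (m.length : Int) - 1 ∧ y = ((m.headD []).length : Int) - 1 then pvINF
                 else min (cell m (x + 1) y) (F m (x + 1) y)) := by
              conv_lhs => rw [F]
              rw [if_pos hgd, if_neg hgr]
            rw [W_push m path (x + 1) y hple
                (fun hc hnil => hpnil hnil (Or.inl hc)), hWe, hF]
        · by_cases hgr : 0 ≤ x ∧ x ≤ (m.length : Int) - 1 ∧ 0 ≤ y + 1 ∧
              y + 1 ≤ ((m.headD []).length : Int) - 1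
          · -- only the right child is pushed
            rw [if_neg hgd, if_pos hgr]
            rw [ih _ _ (by
                rw [pvM_cons]
                dsimp only
                have hlt := pv_dec_right m x y hgr
                omega)
              (by
                intro e he
                rcases he with _ | ⟨_, he⟩
                · exact wfE_push m hD path x (y + 1) hgr.1 hgr.2.1 hgr.2.2.1 hgr.2.2.2 hple
                · exact hwfrest _ he)]
            simp only [List.map_cons, List.foldl_cons]
            congr 1
            have hF : F m x y =
                (if x = (m.length : Int) - 1 ∧ y + 1 = ((m.headD []).length : Int) - 1 then pvINF
                 else min (cell m x (y + 1)) (F m x (y + 1))) := by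
              conv_lhs => rw [F]
              rw [if_neg hgd, if_pos hgr]
            rw [W_push m path x (y + 1) hple
                (fun hc hnil => hpnil hnil (Or.inr hc)), hWe, hF]
          · -- no children at an interior cell: impossible within bounds
            exact absurd ⟨by omega, by omega⟩ hleaf

lemma rowGo_eq (m : List (List Int)) (R C : Int) (hR : R = (m.length : Int))
    (hC : C = ((m.headD []).length : Int)) (nxt : List Int) (i : Int)
    (hi0 : 0 ≤ i) (hiR : i ≤ R - 1)
    (hn : i + 1 ≤ R - 1 → ∀ j : Int, 0 ≤ j → j ≤ C - 1 →
      (PySem.List.pyGet? nxt j).getD 0 = F m (i + 1) j) :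
    ∀ k : Nat, (k : Int) ≤ C →
      rowGo m R C nxt i k
        = (List.range k).map (fun t : Nat => F m i (C - (k : Int) + (t : Int))) := by
  intro k
  induction k with
  | zero => intro _; simp [rowGo]
  | succ k ih =>
    intro hk
    have hk' : (k : Int) ≤ C := by push_cast at hk ⊢; omega
    have hcur := ih hk'
    rw [rowGo, hcur, List.range_succ_eq_map, List.map_cons, List.map_map]
    refine List.cons_eq_cons.mpr ⟨?_, ?_⟩
    · -- head: the freshly computed best equals F m i (C - (k+1))
      rw [F, ← hR, ← hC]
      simp only [Nat.cast_add, Nat.cast_one, Nat.cast_zero, add_zero]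
      have hj0 : (0 : Int) ≤ C - (↑k + 1) := by push_cast at hk; omega
      have hj1 : C - (↑k + 1) ≤ C - 1 := by omega
      by_cases hd : i + 1 < R
      · rw [if_pos hd, if_pos (show 0 ≤ i + 1 ∧ i + 1 ≤ R - 1 ∧ 0 ≤ C - (↑k + 1) ∧
            C - (↑k + 1) ≤ C - 1 from ⟨by omega, by omega, hj0, hj1⟩)]
        rw [hn (by omega) (C - (↑k + 1)) hj0 hj1]
        by_cases hr : C - (↑k + 1) + 1 < C
        · rw [if_pos hr, if_pos (show 0 ≤ i ∧ i ≤ R - 1 ∧ 0 ≤ C - (↑k + 1) + 1 ∧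
              C - (↑k + 1) + 1 ≤ C - 1 from ⟨hi0, hiR, by omega, by omega⟩)]
          have hk1 : 1 ≤ k := by push_cast at hr; omega
          rw [show (PySem.List.pyGet?
                ((List.range k).map (fun t : Nat => F m i (C - (k : Int) + (t : Int)))) 0).getD 0
              = F m i (C - (↑k + 1) + 1) by
            rw [show k = (k - 1) + 1 by omega, List.range_succ_eq_map, List.map_cons,
              PySem.List.pyGet?_zero_cons]
            simp only [Option.getD_some, Nat.cast_zero]
            congr 1
            push_cast
            omega]
        · rw [if_neg hr, if_neg (show ¬(0 ≤ i ∧ i ≤ R - 1 ∧ 0 ≤ C - (↑k + 1) + 1 ∧ C - (↑k + 1) + 1 ≤ C - 1) from fun hcon => hr (by have h4 := hcon.2.2.2; omega))]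
      · rw [if_neg hd, if_neg (show ¬(0 ≤ i + 1 ∧ i + 1 ≤ R - 1 ∧ 0 ≤ C - (↑k + 1) ∧ C - (↑k + 1) ≤ C - 1) from fun hcon => hd (by have h2 := hcon.2.1; omega))]
        by_cases hr : C - (↑k + 1) + 1 < C
        · rw [if_pos hr, if_pos (show 0 ≤ i ∧ i ≤ R - 1 ∧ 0 ≤ C - (↑k + 1) + 1 ∧
              C - (↑k + 1) + 1 ≤ C - 1 from ⟨hi0, hiR, by omega, by omega⟩)]
          have hk1 : 1 ≤ k := by push_cast at hr; omega
          rw [show (PySem.List.pyGet?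
                ((List.range k).map (fun t : Nat => F m i (C - (k : Int) + (t : Int)))) 0).getD 0
              = F m i (C - (↑k + 1) + 1) by
            rw [show k = (k - 1) + 1 by omega, List.range_succ_eq_map, List.map_cons,
              PySem.List.pyGet?_zero_cons]
            simp only [Option.getD_some, Nat.cast_zero]
            congr 1
            push_cast
            omega]
        · rw [if_neg hr, if_neg (show ¬(0 ≤ i ∧ i ≤ R - 1 ∧ 0 ≤ C - (↑k + 1) + 1 ∧ C - (↑k + 1) + 1 ≤ C - 1) from fun hcon => hr (by have h4 := hcon.2.2.2; omega))]
    · apply List.map_congr_left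
      intro t _
      simp only [Function.comp]
      congr 1
      push_cast
      omega

lemma lookup_row (m : List (List Int)) (C : Int) (i j : Int) (hj0 : 0 ≤ j) (hj1 : j ≤ C - 1) :
    (PySem.List.pyGet? ((List.range C.toNat).map
        (fun t : Nat => F m i (C - (C.toNat : Int) + (t : Int)))) j).getD 0 = F m i j := by
  rw [PySem.List.pyGet?_of_nonneg _ hj0]
  have hjlt : j.toNat < C.toNat := by omega
  rw [List.getElem?_map]
  simp only [List.getElem?_range, hjlt, Option.map_some, Option.getD_some]
  congr 1
  omega

lemma outer_loop (m : List (List Int)) (R C : Int) (hR : R = (m.length : Int))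
    (hC : C = ((m.headD []).length : Int)) (hC1 : 1 ≤ C) :
    ∀ (n : Nat) (i0 : Int) (nxt : List Int), i0.toNat = n → 0 ≤ i0 → i0 ≤ R - 1 →
      (i0 + 1 ≤ R - 1 → ∀ j : Int, 0 ≤ j → j ≤ C - 1 →
        (PySem.List.pyGet? nxt j).getD 0 = F m (i0 + 1) j) →
      (PySem.List.pyRange i0 (-1) (-1)).foldl (fun acc i => rowGo m R C acc i C.toNat) nxt
        = (List.range C.toNat).map
            (fun t : Nat => F m 0 (C - (C.toNat : Int) + (t : Int))) := by
  intro n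
  induction n with
  | zero =>
    intro i0 nxt hn h0 _ hgood
    have hi0 : i0 = 0 := by omega
    subst hi0
    rw [PySem.List.pyRange_neg_one_cons (by norm_num), List.foldl_cons,
      PySem.List.pyRange_neg_one_eq_nil (by norm_num), List.foldl_nil]
    exact rowGo_eq m R C hR hC nxt 0 (by norm_num) (by omega) hgood C.toNat (by omega)
  | succ n ih =>
    intro i0 nxt hn h0 hle hgood
    have h1 : 1 ≤ i0 := by omega
    rw [PySem.List.pyRange_neg_one_cons (by omega), List.foldl_cons]
    have hrow := rowGo_eq m R C hR hC nxt i0 (by omega) hle hgood C.toNat (by omega)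
    rw [hrow]
    have := ih (i0 - 1) ((List.range C.toNat).map
        (fun t : Nat => F m i0 (C - (C.toNat : Int) + (t : Int))))
      (by omega) (by omega) (by omega)
      (fun _ j hj0 hj1 => by
        rw [lookup_row m C i0 j hj0 hj1]
        congr 1
        omega)
    exact this

lemma alt_eq (m : List (List Int)) (hPre : Pre_pathMaxScore m) :
    pathMaxScore_alt m = max 0 (F m 0 0) := by
  obtain ⟨hm, hh, _, hsum⟩ := hPre
  have hR1 : (1 : Int) ≤ (m.length : Int) := by
    have := List.length_pos_of_ne_nil hm
    omega
  have hC1 : (1 : Int) ≤ ((m.headD []).length : Int) := by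
    have := List.length_pos_of_ne_nil hh
    omega
  unfold pathMaxScore_alt
  simp only []
  rw [outer_loop m ((m.length : Int)) (((m.headD []).length : Int)) rfl rfl hC1
    ((m.length : Int) - 1).toNat ((m.length : Int) - 1) [] rfl (by omega) (by omega)
    (fun hcon => absurd hcon (by omega))]
  rw [lookup_row m (((m.headD []).length : Int)) 0 0 le_rfl (by omega)]

lemma a_eq (m : List (List Int)) (hD : Dom_pathMaxScore m) (hPre : Pre_pathMaxScore m) :
    pathMaxScore m = max 0 (F m 0 0) := by
  obtain ⟨hm, hh, _, hsum⟩ := hPre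
  have hR1 : 0 < m.length := List.length_pos_of_ne_nil hm
  have hC1 : 0 < (m.headD []).length := List.length_pos_of_ne_nil hh
  have hnl : ¬((0 : Int) = (m.length : Int) - 1 ∧ (0 : Int) = ((m.headD []).length : Int) - 1) := by
    intro hcon
    omega
  have hnp : ¬(((0 : Int) + 1 = (m.length : Int) - 1 ∧ (0 : Int) = ((m.headD []).length : Int) - 1) ∨
      ((0 : Int) = (m.length : Int) - 1 ∧ (0 : Int) + 1 = ((m.headD []).length : Int) - 1)) := by
    rintro (hcon | hcon) <;> omega
  show loopA m (3 ^ (m.length + (m.headD []).length))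
      [(cell m 0 0, ((0 : Int), (0 : Int)), ([] : List Int))] 0 = max 0 (F m 0 0)
  rw [loopA_inv m hD _ _ 0
    (by
      show pvW m 0 0 + 0 ≤ 3 ^ (m.length + (m.headD []).length)
      unfold pvW
      have hle : (((m.length : Int) - 1 - 0) + (((m.headD []).length : Int) - 1 - 0)).toNat
          ≤ m.length + (m.headD []).length := by omega
      have := Nat.pow_le_pow_right (by norm_num : 1 ≤ 3) hle
      omega)
    (by
      intro e he
      rcases he with _ | ⟨_, he⟩
      · unfold wfE
        dsimp only
        exact ⟨le_refl 0, by omega, le_refl 0, by omega, fun v hv => absurd hv List.not_mem_nil,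
          fun _ => hnp⟩
      · cases he)]
  simp only [List.map_cons, List.map_nil, List.foldl_cons, List.foldl_nil]
  congr 1
  unfold W
  simp only
  rw [if_neg hnl]
  rfl

-- ===== VERDICT (by name: the statement is the Claim_ definition above) =====
theorem pathMaxScore_spec : Claim_equal_pathMaxScore := by
  intro m hD hPre
  unfold Spec_pathMaxScore
  rw [a_eq m hD hPre, alt_eq m hPre]
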